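-- pv_equiv track=rewrite | github.com/kh277/BOJ | 백준/Gold/21695. Школа танцев/Школа танцев.py | solve
-- ===== SOURCE A (Python) =====
-- def solve(N, A):
--     # 누적 합 배열 전처리
--     sumDict = dict()
--     sumDict[0] = 1
--     accSum = 0
--     for i in range(N):
--         if A[i] == 'a':
--             accSum += 1
--         else:
--             accSum -= 1
--         if accSum in sumDict:
--             sumDict[accSum] += 1
--         else:
--             sumDict[accSum] = 1
--
--     # 누적 합 값 배열 처리
--     count = 0
--     for k in sumDict.keys():
--         curV = sumDict[k]
--         count += curV * (curV - 1) // 2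
--
--     return count
-- ===== SOURCE B (Python) =====
-- def solve(N, A):
--     # sort-then-scan: build the prefix-balance list, sort it, and count
--     # pairs inside equal runs of the sorted list (no hash table at all)
--     prefix = [0]
--     s = 0
--     for ch in A[:max(0, N)]:
--         s += 1 if ch == 'a' else -1
--         prefix.append(s)
--     prefix.sort()
--     count = 0
--     run = 0
--     prev = None
--     for x in prefix:
--         if prev == x:
--             count += run
--             run += 1
--         else:
--             run = 1
--         prev = x
--     return count
-- ===== Notes on version B (the rewrite author's own statement) =====
-- stated objective: alternative
-- what changed: B replaces A's hash-table of prefix-balance frequencies and C(v,2) aggregation by a sort-then-scan: it materialises the prefix-balance list, sorts it, and counts pairs inside equal runs of the sorted list with a run-length accumulator (no dict at all).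
import Mathlib
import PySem

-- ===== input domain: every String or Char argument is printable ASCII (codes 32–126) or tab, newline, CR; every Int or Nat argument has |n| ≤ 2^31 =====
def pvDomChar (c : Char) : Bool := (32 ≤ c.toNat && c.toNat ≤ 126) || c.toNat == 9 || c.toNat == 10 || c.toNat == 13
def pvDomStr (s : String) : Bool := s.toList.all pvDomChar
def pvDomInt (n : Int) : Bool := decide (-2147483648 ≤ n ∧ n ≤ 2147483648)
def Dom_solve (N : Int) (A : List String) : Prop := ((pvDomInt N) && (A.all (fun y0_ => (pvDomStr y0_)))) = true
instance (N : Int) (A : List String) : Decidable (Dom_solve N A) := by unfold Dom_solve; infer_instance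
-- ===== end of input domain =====

-- B replaces A's frequency dict + C(v,2) aggregation by sorting the prefix-balance list and
-- counting pairs inside equal runs of the sorted list; objective: alternative (same answer, no dict).

-- ===== PORT A =====
-- loop body of A's 'for i in range(N)' loop (dict update via the in-test, as in A)
def solveLoopA (A : List String) (st : PySem.Dict Int Int × Int) (i : Int) :
    PySem.Dict Int Int × Int :=
  let x := PySem.List.pyGetD A i ""   -- A[i]; total form, in range under Pre_solve
  let s := if x = "a" then st.2 + 1 else st.2 - 1
  let d := if st.1.contains s then st.1.insert s (st.1.getD s 0 + 1) else st.1.insert s 1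
  (d, s)

def solve (N : Int) (A : List String) : Int :=
  let st := (PySem.List.pyRange 0 N 1).foldl (solveLoopA A)
              ((PySem.Dict.empty).insert 0 1, 0)
  -- second loop: for k in sumDict.keys(): count += sumDict[k]*(sumDict[k]-1)//2
  -- (sumDict[k] with k drawn from keys never raises; getD is its total form)
  st.1.keys.foldl
    (fun c k =>
      let curV := st.1.getD k 0
      c + PySem.Int.floordiv (curV * (curV - 1)) 2) 0

-- ===== PORT B =====
-- prefix-list building loop: prefix.append(s) after updating s
def prefixStepB (st : List Int × Int) (ch : String) : List Int × Int :=
  let s := if ch = "a" then st.2 + 1 else st.2 - 1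
  (st.1 ++ [s], s)

-- scan loop over the sorted prefix list: state (count, run, prev)
def scanStepB (st : Int × Int × Option Int) (x : Int) : Int × Int × Option Int :=
  if st.2.2 == some x then (st.1 + st.2.1, st.2.1 + 1, some x)
  else (st.1, 1, some x)

def solve_alt (N : Int) (A : List String) : Int :=
  let xs := PySem.List.slice A (some 0) (some (max 0 N))   -- A[:max(0, N)]
  let pr := xs.foldl prefixStepB ([0], 0)
  let sp := PySem.List.sorted pr.1 (fun x => x) false      -- prefix.sort()
  (sp.foldl scanStepB (0, 0, none)).1

-- ===== PRECONDITION & SPEC =====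
-- Pre_ excludes exactly the inputs where A raises IndexError: N beyond the length of A.
def Pre_solve (N : Int) (A : List String) : Prop := N ≤ (A.length : Int)
instance (N : Int) (A : List String) : Decidable (Pre_solve N A) := by
  unfold Pre_solve; infer_instance

def pvWitness_solve : Int × List String := (3, ["a", "b", "a"])

def Spec_solve (N : Int) (A : List String) (out : Int) : Prop := out = solve_alt N A
instance (N : Int) (A : List String) (out : Int) : Decidable (Spec_solve N A out) := by
  unfold Spec_solve; infer_instance

-- ===== CLAIM (what is proved, stated in full; the proofs are below) =====
def Claim_equal_solve : Prop :=
  ∀ (N : Int) (A : List String), Dom_solve N A → Pre_solve N A → Spec_solve N A (solve N A)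

-- ===== LEMMAS AND PROOFS =====

-- the successive prefix-balance values produced from running sum s over the characters
def pvSums : Int → List String → List Int
  | _, [] => []
  | s, ch :: t =>
      let s' := if ch = "a" then s + 1 else s - 1
      s' :: pvSums s' t

-- C(v,2) as A computes it
def cPair (v : Int) : Int := PySem.Int.floordiv (v * (v - 1)) 2

-- number of index pairs i < j with l[i] = l[j]
def pairs : List Int → Int
  | [] => 0
  | x :: t => (t.count x : Int) + pairs t

theorem cPair_succ (v : Int) : cPair (v + 1) = cPair v + v := by
  unfold cPair
  rw [PySem.Int.floordiv_eq_ediv_of_pos (by norm_num),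
      PySem.Int.floordiv_eq_ediv_of_pos (by norm_num)]
  have h : (v + 1) * (v + 1 - 1) = v * (v - 1) + v * 2 := by ring
  rw [h, Int.add_mul_ediv_right _ _ (by norm_num : (2 : Int) ≠ 0)]

theorem pairs_append_singleton (l : List Int) (x : Int) :
    pairs (l ++ [x]) = pairs l + (l.count x : Int) := by
  induction l with
  | nil => simp [pairs]
  | cons y t ih =>
    simp only [List.cons_append, pairs, ih, List.count_append, List.count_cons,
      List.count_nil, beq_iff_eq]
    push_cast
    split_ifs <;> omega

theorem pairs_perm {l l' : List Int} (h : l.Perm l') : pairs l = pairs l' := by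
  induction h with
  | nil => rfl
  | cons x h ih => simp [pairs, ih, h.count_eq]
  | swap x y t =>
    simp only [pairs, List.count_cons, beq_iff_eq]
    push_cast
    split_ifs <;> omega
  | trans _ _ ih₁ ih₂ => exact ih₁.trans ih₂

-- A's loop body on the fetched element, with the contains-branch as written
def elemBranchA (st : PySem.Dict Int Int × Int) (x : String) : PySem.Dict Int Int × Int :=
  let s := if x = "a" then st.2 + 1 else st.2 - 1
  let d := if st.1.contains s then st.1.insert s (st.1.getD s 0 + 1) else st.1.insert s 1
  (d, s)

-- the branch collapses: both arms are insert s (getD s 0 + 1)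
def elemStepA (st : PySem.Dict Int Int × Int) (x : String) : PySem.Dict Int Int × Int :=
  let s := if x = "a" then st.2 + 1 else st.2 - 1
  (st.1.insert s (st.1.getD s 0 + 1), s)

theorem elemBranchA_eq (st : PySem.Dict Int Int × Int) (x : String) :
    elemBranchA st x = elemStepA st x := by
  unfold elemBranchA elemStepA
  by_cases h : st.1.contains (if x = "a" then st.2 + 1 else st.2 - 1) = true
  · simp [h]
  · have h' : st.1.contains (if x = "a" then st.2 + 1 else st.2 - 1) = false := by
      simpa using h
    simp only [h']
    rw [PySem.Dict.getD_of_not_contains st.1 0 h']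
    norm_num

theorem foldA_elem (xs : List String) :
    ∀ (d : PySem.Dict Int Int) (s : Int),
      (xs.foldl elemStepA (d, s)).1 =
        (pvSums s xs).foldl (fun d x => d.insert x (d.getD x 0 + 1)) d := by
  induction xs with
  | nil => intro d s; rfl
  | cons ch t ih =>
    intro d s
    simp only [List.foldl_cons, pvSums, elemStepA]
    exact ih _ _

theorem sum_map_eq_add_of_nodup (ks : List Int) (f g : Int → Int) (x δ : Int)
    (hnd : ks.Nodup) (hx : x ∈ ks) (hfx : f x = g x + δ)
    (hne : ∀ k ∈ ks, k ≠ x → f k = g k) :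
    (ks.map f).sum = (ks.map g).sum + δ := by
  induction ks with
  | nil => cases hx
  | cons y t ih =>
    simp only [List.nodup_cons] at hnd
    rcases List.mem_cons.mp hx with rfl | hxt
    · have ht : t.map f = t.map g := by
        apply List.map_congr_left
        intro k hk
        exact hne k (List.mem_cons_of_mem _ hk) (fun h => hnd.1 (h ▸ hk))
      simp only [List.map_cons, List.sum_cons, ht, hfx]
      ring
    · have hy : f y = g y := hne y (List.mem_cons_self) (fun h => hnd.1 (h ▸ hxt))
      simp only [List.map_cons, List.sum_cons, hy,
        ih hnd.2 hxt (fun k hk hkx => hne k (List.mem_cons_of_mem _ hk) hkx)]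
      ring

-- Σ over the distinct values of C(count,2) equals the pair count
theorem sumC_eq_pairs (l : List Int) :
    ((PySem.Set.ofList l).map (fun k => cPair ((l.count k : Int)))).sum = pairs l := by
  induction l using List.reverseRecOn with
  | nil => simp [pairs, PySem.Set.ofList]
  | append_singleton l x ih =>
    by_cases hx : x ∈ l
    · have hset : PySem.Set.ofList (l ++ [x]) = PySem.Set.ofList l := by
        rw [PySem.Set.ofList_eq_foldl, List.foldl_append, ← PySem.Set.ofList_eq_foldl,
          List.foldl_cons, List.foldl_nil]
        simp [PySem.Set.add, PySem.Set.contains, (PySem.Set.mem_ofList l x).mpr hx]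
      rw [pairs_append_singleton, hset, ← ih]
      refine sum_map_eq_add_of_nodup _ _ _ x ((l.count x : Int)) (PySem.Set.nodup_ofList l)
        ((PySem.Set.mem_ofList l x).mpr hx) ?_ ?_
      · have h1 : (l ++ [x]).count x = l.count x + 1 := by
          simp [List.count_append]
        rw [h1]
        push_cast
        rw [cPair_succ]
      · intro k hk hkx
        rw [List.count_append]
        have : [x].count k = 0 := by simp [hkx.symm]
        rw [this, Nat.add_zero]
    · have hset : PySem.Set.ofList (l ++ [x]) = PySem.Set.ofList l ++ [x] := by
        rw [PySem.Set.ofList_eq_foldl, List.foldl_append, ← PySem.Set.ofList_eq_foldl,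
          List.foldl_cons, List.foldl_nil]
        simp only [PySem.Set.add, PySem.Set.contains]
        split
        · next hc =>
            exact absurd ((PySem.Set.mem_ofList l x).mp (by simpa using hc)) hx
        · rfl
      have hcx : l.count x = 0 := List.count_eq_zero.mpr hx
      rw [pairs_append_singleton, hset, List.map_append, List.sum_append]
      have hmap : (PySem.Set.ofList l).map (fun k => cPair (((l ++ [x]).count k : Int)))
          = (PySem.Set.ofList l).map (fun k => cPair ((l.count k : Int))) := by
        apply List.map_congr_left
        intro k hk
        have hkx : k ≠ x := fun h => hx (h ▸ (PySem.Set.mem_ofList l k).mp hk)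
        rw [List.count_append]
        have : [x].count k = 0 := by simp [hkx.symm]
        rw [this, Nat.add_zero]
      have h1 : (l ++ [x]).count x = 1 := by
        simp [List.count_append, hcx]
      have hsing : ([x].map (fun k => cPair (((l ++ [x]).count k : Int)))).sum = 0 := by
        simp only [List.map_cons, List.map_nil, List.sum_cons, List.sum_nil, h1]
        decide
      rw [hmap, ih, hsing, hcx]
      simp

-- B's prefix-building loop produces [0] ++ pvSums 0 xs
theorem prefix_fold (xs : List String) :
    ∀ (acc : List Int) (s : Int),
      (xs.foldl prefixStepB (acc, s)).1 = acc ++ pvSums s xs := by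
  induction xs with
  | nil => intro acc s; simp [pvSums]
  | cons ch t ih =>
    intro acc s
    simp only [List.foldl_cons, prefixStepB, pvSums, ih, List.append_assoc,
      List.singleton_append]

-- B's scan over a sorted tail
theorem foldB_inv (t : List Int) :
    ∀ (c r p : Int), t.Pairwise (· ≤ ·) → (∀ y ∈ t, p ≤ y) →
      (t.foldl scanStepB (c, r, some p)).1 = c + pairs t + r * (t.count p : Int) := by
  induction t with
  | nil => intro c r p _ _; simp [pairs]
  | cons x t ih =>
    intro c r p hpw hlb
    have hpx : p ≤ x := hlb x (List.mem_cons_self)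
    have hpw' : t.Pairwise (· ≤ ·) := hpw.of_cons
    have hxt : ∀ y ∈ t, x ≤ y := fun y hy => List.rel_of_pairwise_cons hpw hy
    by_cases hx : p = x
    · subst hx
      have hstep : scanStepB (c, r, some p) p = (c + r, r + 1, some p) := by
        simp [scanStepB]
      rw [List.foldl_cons, hstep, ih (c + r) (r + 1) p hpw' hxt]
      simp only [pairs, List.count_cons_self]
      push_cast
      ring
    · have hplt : p < x := lt_of_le_of_ne hpx hx
      have hcount : (x :: t).count p = 0 := by
        rw [List.count_eq_zero]
        intro hmem
        rcases List.mem_cons.mp hmem with rfl | hmem'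
        · exact hx rfl
        · exact absurd (hxt p hmem') (by omega)
      have hstep : scanStepB (c, r, some p) x = (c, 1, some x) := by
        simp [scanStepB, hx]
      rw [List.foldl_cons, hstep, ih c 1 x hpw' hxt, hcount]
      simp only [pairs]
      push_cast
      ring

-- ===== VERDICT (by name: the statement is the Claim_ definition above) =====
-- both programs compute pairs (0 :: pvSums 0 (A.take (max 0 N).toNat))
theorem solveA_eq_pairs (N : Int) (A : List String) (hpre : N ≤ (A.length : Int)) :
    solve N A = pairs (0 :: pvSums 0 (A.take (max 0 N).toNat)) := by
  have hxslen : ((A.take (max 0 N).toNat).length : Int) = max 0 N := by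
    simp only [List.length_take]
    rcases le_total N 0 with h | h
    · rw [max_eq_left h]
      simp
    · rw [max_eq_right h]
      have hle : N.toNat ≤ A.length := by omega
      rw [min_eq_left hle]
      omega
  have hrange : PySem.List.pyRange 0 N 1
      = PySem.List.pyRange 0 (PySem.List.len (A.take (max 0 N).toNat)) 1 := by
    rw [PySem.List.len_eq, hxslen, PySem.List.pyRange_one, PySem.List.pyRange_one]
    have : (N - 0).toNat = (max 0 N - 0).toNat := by
      rcases le_total N 0 with h | h
      · rw [max_eq_left h]; omega
      · rw [max_eq_right h]
    rw [this]
  have hAfold :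
      ((PySem.List.pyRange 0 N 1).foldl (solveLoopA A) ((PySem.Dict.empty).insert 0 1, 0)).1
        = PySem.Dict.counter (0 :: pvSums 0 (A.take (max 0 N).toNat)) := by
    rw [hrange]
    have hcong : (PySem.List.pyRange 0 (PySem.List.len (A.take (max 0 N).toNat)) 1).foldl
          (solveLoopA A) ((PySem.Dict.empty).insert 0 1, 0)
        = (PySem.List.pyRange 0 (PySem.List.len (A.take (max 0 N).toNat)) 1).foldl
          (fun st i => elemBranchA st (PySem.List.pyGetD (A.take (max 0 N).toNat) i ""))
          ((PySem.Dict.empty).insert 0 1, 0) := by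
      apply PySem.List.foldl_congr_mem
      intro st i hi
      have hi' := PySem.List.mem_pyRange_one.mp hi
      rw [PySem.List.len_eq] at hi'
      show elemBranchA st (PySem.List.pyGetD A i "")
          = elemBranchA st (PySem.List.pyGetD (A.take (max 0 N).toNat) i "")
      congr 1
      have hilt : i < ((A.take (max 0 N).toNat).length : Int) := hi'.2
      have hiltA : i < (A.length : Int) := by
        simp only [List.length_take] at hilt
        omega
      rw [PySem.List.pyGetD_eq_getElem A "" hi'.1 hiltA,
          PySem.List.pyGetD_eq_getElem (A.take (max 0 N).toNat) "" hi'.1 hilt]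
      rw [List.getElem_take]
    rw [hcong,
        PySem.List.foldl_pyRange_pyGetD (A.take (max 0 N).toNat) "" elemBranchA
          ((PySem.Dict.empty).insert 0 1, 0) (le_refl 0),
]
    simp only [Int.toNat_zero, List.drop_zero]
    rw [PySem.List.foldl_congr_mem (A.take (max 0 N).toNat) elemBranchA elemStepA
          ((PySem.Dict.empty).insert 0 1, 0) (fun st x _ => elemBranchA_eq st x),
        foldA_elem]
    have hc := PySem.Dict.foldl_insert_getD_add_one_eq_counter
        ((0 : Int) :: pvSums 0 (A.take (max 0 N).toNat))
    rw [List.foldl_cons] at hc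
    rw [← hc]
    have h01 : (PySem.Dict.empty : PySem.Dict Int Int).insert 0 1
        = (PySem.Dict.empty : PySem.Dict Int Int).insert 0
            ((PySem.Dict.empty : PySem.Dict Int Int).getD 0 0 + 1) := by
      norm_num [PySem.Dict.getD_empty]
    rw [h01]
  simp only [solve]
  rw [hAfold]
  rw [PySem.List.foldl_congr_mem
        (PySem.Dict.counter (0 :: pvSums 0 (A.take (max 0 N).toNat))).keys _
        (fun c k => c + cPair ((0 :: pvSums 0 (A.take (max 0 N).toNat)).count k : Int)) 0
        (fun c k _ => by rw [PySem.Dict.getD_counter]; rfl),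
      PySem.List.foldl_add, PySem.Dict.keys_counter, sumC_eq_pairs]
  omega

theorem solveB_eq_pairs (N : Int) (A : List String) :
    solve_alt N A = pairs (0 :: pvSums 0 (A.take (max 0 N).toNat)) := by
  have hslice : PySem.List.slice A (some 0) (some (max 0 N)) = A.take (max 0 N).toNat := by
    rw [PySem.List.slice_zero_start, PySem.List.slice_to A (le_max_left 0 N)]
  simp only [solve_alt]
  rw [hslice, prefix_fold (A.take (max 0 N).toNat) [0] 0, List.singleton_append]
  have hLne : (0 : Int) :: pvSums 0 (A.take (max 0 N).toNat) ≠ [] := by simp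
  rcases hsp : PySem.List.sorted ((0 : Int) :: pvSums 0 (A.take (max 0 N).toNat))
      (fun x => x) false with _ | ⟨x, t⟩
  · exact absurd ((PySem.List.sorted_eq_nil_iff _ _ false).mp hsp) hLne
  · have hpw : (x :: t).Pairwise (· ≤ ·) := by
      have := PySem.List.sorted_pairwise
        ((0 : Int) :: pvSums 0 (A.take (max 0 N).toNat)) (fun x => x)
      rw [hsp] at this
      simpa using this
    have hperm : pairs (x :: t) = pairs ((0 : Int) :: pvSums 0 (A.take (max 0 N).toNat)) :=
      pairs_perm (hsp ▸ PySem.List.sorted_perm _ _ false)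
    rw [List.foldl_cons]
    have hstep : scanStepB (0, 0, none) x = (0, 1, some x) := by simp [scanStepB]
    rw [hstep,
        foldB_inv t 0 1 x hpw.of_cons (fun y hy => List.rel_of_pairwise_cons hpw hy),
        ← hperm]
    simp only [pairs]
    omega

theorem solve_spec : Claim_equal_solve := by
  intro N A _ hpre
  unfold Spec_solve
  rw [solveA_eq_pairs N A hpre, solveB_eq_pairs N A]
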